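-- pv_equiv track=rewrite | github.com/Kirill-Kravtsov/kaggle-tweet-sentiment-extraction | src/data_utils.py | get_word_offsets
-- ===== SOURCE A (Python) =====
-- def get_word_offsets(text):
--     """
--     With inclusive ranges
--     """
--     words = text.split()
--     index = text.index
--     offsets = []
--     running_offset = 0
--     for word in words:
--         word_offset = index(word, running_offset)
--         word_len = len(word)
--         running_offset = word_offset + word_len
--         offsets.append((word, word_offset, running_offset - 1))
--     return offsets
-- ===== SOURCE B (Python) =====
-- def get_word_offsets(text):
--     """
--     With inclusive ranges
--     """
--     offsets = []
--     cur = []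
--     i = 0
--     for ch in text:
--         if ch.isspace():
--             if cur:
--                 offsets.append((''.join(cur), i - len(cur), i - 1))
--                 cur = []
--         else:
--             cur.append(ch)
--         i += 1
--     if cur:
--         offsets.append((''.join(cur), i - len(cur), i - 1))
--     return offsets
-- ===== Notes on version B (the rewrite author's own statement) =====
-- stated objective: alternative
-- what changed: Replaced split() plus repeated text.index substring searches with a single left-to-right character scan that accumulates the current word and emits (word, start, end) at whitespace boundaries; trades A's C-level split/index calls for one uniform pass with no searching.
import Mathlib
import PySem

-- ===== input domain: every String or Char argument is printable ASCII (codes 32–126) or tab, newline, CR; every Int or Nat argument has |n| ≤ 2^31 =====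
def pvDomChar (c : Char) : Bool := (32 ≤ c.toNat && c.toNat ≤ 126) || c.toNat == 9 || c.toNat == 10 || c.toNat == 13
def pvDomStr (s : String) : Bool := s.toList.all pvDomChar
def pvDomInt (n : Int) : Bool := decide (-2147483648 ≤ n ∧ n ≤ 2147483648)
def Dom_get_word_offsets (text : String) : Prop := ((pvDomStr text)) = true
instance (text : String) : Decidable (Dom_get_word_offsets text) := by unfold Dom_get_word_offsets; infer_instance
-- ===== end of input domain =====

-- B replaces A's split()+text.index() searches by one left-to-right character scan; same results, proved equal on all inputs.

-- ===== PORT A =====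
-- Literal port of A: words = text.split(); for each word, text.index(word, running_offset).
-- (Chars.findFrom returns -1 exactly where Python str.index would raise ValueError;
-- the search always succeeds here — proved below — so that branch is never taken.)
def get_word_offsets (text : String) : List (String × Int × Int) :=
  let words := PySem.Str.split₀ text
  (words.foldl (fun (st : List (String × Int × Int) × Int) word =>
      let word_offset := PySem.Str.findFrom text word st.2
      let word_len := PySem.Str.len word
      (st.1 ++ [(word, word_offset, word_offset + word_len - 1)], word_offset + word_len))
    ([], 0)).1

-- ===== PORT B =====
-- Port of B's single scan: running index i, current-word accumulator `cur`,
-- flush (word, i - len(cur), i - 1) on whitespace and once more at the end.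
def pvAltGo : List Char → Int → List Char → List (String × Int × Int) → List (String × Int × Int)
  | [], i, cur, acc =>
      if cur.isEmpty then acc else acc ++ [(String.ofList cur, i - cur.length, i - 1)]
  | c :: rest, i, cur, acc =>
      if PySem.Chars.isspace c then
        if cur.isEmpty then pvAltGo rest (i + 1) [] acc
        else pvAltGo rest (i + 1) [] (acc ++ [(String.ofList cur, i - cur.length, i - 1)])
      else pvAltGo rest (i + 1) (cur ++ [c]) acc


def get_word_offsets_alt (text : String) : List (String × Int × Int) :=
  pvAltGo text.toList 0 [] []

-- ===== PRECONDITION & SPEC =====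
def Spec_get_word_offsets (text : String) (out : List (String × Int × Int)) : Prop := out = get_word_offsets_alt text
instance (text : String) (out : List (String × Int × Int)) : Decidable (Spec_get_word_offsets text out) := by unfold Spec_get_word_offsets; infer_instance

-- ===== CLAIM (what is proved, stated in full; the proofs are below) =====
def Claim_equal_get_word_offsets : Prop := ∀ (text : String), Dom_get_word_offsets text → Spec_get_word_offsets text (get_word_offsets text)

-- ===== LEMMAS AND PROOFS =====

-- canonical tokenisation with inclusive offsets: the meeting point of both proofs
def pvTok : List Char → Int → List (String × Int × Int)
  | [], _ => []
  | c :: r, i =>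
      if PySem.Chars.isspace c then pvTok r (i + 1)
      else
        (String.ofList (c :: r.takeWhile (fun d => !PySem.Chars.isspace d)), i,
          i + (r.takeWhile (fun d => !PySem.Chars.isspace d)).length) ::
        pvTok (r.drop (r.takeWhile (fun d => !PySem.Chars.isspace d)).length)
          (i + 1 + (r.takeWhile (fun d => !PySem.Chars.isspace d)).length)
  termination_by s _ => s.length
  decreasing_by all_goals simp [List.length_drop]

-- the word list text.split() produces, in the same recursion shape as pvTok
def pvW : List Char → List (List Char)
  | [] => []
  | c :: r =>
      if PySem.Chars.isspace c then pvW r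
      else (c :: r.takeWhile (fun d => !PySem.Chars.isspace d)) ::
        pvW (r.drop (r.takeWhile (fun d => !PySem.Chars.isspace d)).length)
  termination_by s => s.length
  decreasing_by all_goals simp [List.length_drop]


lemma pvSplit_go_spec : ∀ (s cur : List Char) (accs : List (List Char)),
    PySem.Chars.split₀.go s cur accs =
      accs.reverse ++
        (if cur.isEmpty then pvW s
         else (cur.reverse ++ s.takeWhile (fun d => !PySem.Chars.isspace d)) ::
           pvW (s.drop (s.takeWhile (fun d => !PySem.Chars.isspace d)).length)) := by
  intro s
  induction s with
  | nil =>
    intro cur accs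
    by_cases h : cur.isEmpty <;> simp [PySem.Chars.split₀.go, pvW, h]
  | cons c r ih =>
    intro cur accs
    by_cases hsp : PySem.Chars.isspace c
    · by_cases hcur : cur.isEmpty
      · simp [PySem.Chars.split₀.go, hsp, hcur, ih, pvW]
      · simp [PySem.Chars.split₀.go, hsp, hcur, ih, pvW]
    · simp [PySem.Chars.split₀.go, hsp, ih, pvW]

lemma pvSplit_eq_pvW (s : List Char) : PySem.Chars.split₀ s = pvW s := by
  simp [PySem.Chars.split₀, pvSplit_go_spec]

lemma pvAltGo_spec : ∀ (s : List Char) (i : Int) (cur : List Char) (acc : List (String × Int × Int)),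
    pvAltGo s i cur acc =
      acc ++
        (if cur.isEmpty then pvTok s i
         else (String.ofList (cur ++ s.takeWhile (fun d => !PySem.Chars.isspace d)), i - cur.length,
             i + (s.takeWhile (fun d => !PySem.Chars.isspace d)).length - 1) ::
           pvTok (s.drop (s.takeWhile (fun d => !PySem.Chars.isspace d)).length)
             (i + (s.takeWhile (fun d => !PySem.Chars.isspace d)).length)) := by
  intro s
  induction s with
  | nil =>
    intro i cur acc
    by_cases h : cur.isEmpty <;> simp [pvAltGo, pvTok, h]
  | cons c r ih =>
    intro i cur acc
    by_cases hsp : PySem.Chars.isspace c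
    · by_cases hcur : cur.isEmpty
      · simp [pvAltGo, hsp, hcur, ih, pvTok]
      · simp [pvAltGo, hsp, hcur, ih, pvTok]
    · simp [pvAltGo, hsp, ih, pvTok]
      by_cases hcur : cur.isEmpty
      · simp [List.isEmpty_iff.mp hcur]
        omega
      · rw [if_neg (by simpa using hcur)]
        ring_nf


-- text.index(word, run) from a run position followed only by whitespace before the
-- word's real start finds exactly that start (word's head is not whitespace)
lemma pvFind_ws (ws s w' : List Char) (c : Char)
    (hws : ∀ x ∈ ws, PySem.Chars.isspace x = true)
    (hc : PySem.Chars.isspace c = false)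
    (hpre : (c :: w') <+: s) :
    PySem.Chars.find (ws ++ s) (c :: w') = (ws.length : Int) := by
  obtain ⟨u, rfl⟩ := hpre
  have hinf : (c :: w') <:+: ws ++ ((c :: w') ++ u) := ⟨ws, u, by simp⟩
  have h0 : 0 ≤ PySem.Chars.find (ws ++ ((c :: w') ++ u)) (c :: w') :=
    (PySem.Chars.find_nonneg_iff _ _).2 hinf
  obtain ⟨hp, hmin⟩ := PySem.Chars.find_spec h0
  set f := PySem.Chars.find (ws ++ ((c :: w') ++ u)) (c :: w') with hf
  have h1 : ¬ f.toNat < ws.length := by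
    intro h
    rw [List.drop_append_of_le_length (by omega), List.drop_eq_getElem_cons h] at hp
    have hcw := (List.cons_prefix_cons.mp hp).1
    have hsp := hws _ (List.getElem_mem h)
    rw [← hcw] at hsp
    rw [hsp] at hc
    exact absurd hc (by simp)
  have h2 : ¬ ws.length < f.toNat := by
    intro h
    exact hmin ws.length h (by simp)
  omega


-- A's loop body, at the character-list level
def pvStep (t : List Char) (st : List (String × Int × Int) × Int) (w : List Char) :
    List (String × Int × Int) × Int :=
  let wo := PySem.Chars.findFrom t w st.2
  (st.1 ++ [(String.ofList w, wo, wo + w.length - 1)], wo + w.length)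


-- A's fold over the word list, tracking run/k through the whitespace gap, yields pvTok
lemma pvFoldA (t : List Char) : ∀ (n : Nat) (s : List Char), s.length ≤ n →
    ∀ (run k : Nat) (ws : List Char) (acc : List (String × Int × Int)),
    s = t.drop k → t.drop run = ws ++ s → run + ws.length = k →
    (∀ x ∈ ws, PySem.Chars.isspace x = true) →
    ((pvW s).foldl (pvStep t) (acc, (run : Int))).1 = acc ++ pvTok s (k : Int) := by
  intro n
  induction n with
  | zero =>
    intro s hs run k ws acc h1 h2 h3 h4
    have : s = [] := List.eq_nil_of_length_eq_zero (by omega)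
    subst this
    simp [pvW, pvTok]
  | succ n ih =>
    intro s hs run k ws acc h1 h2 h3 h4
    match s, h1 with
    | [], _ => simp [pvW, pvTok]
    | c :: r, h1 =>
      have hk1 : r = t.drop (k + 1) := by
        have h := congrArg (List.drop 1) h1
        simpa [List.drop_drop] using h
      by_cases hsp : PySem.Chars.isspace c
      · rw [show pvW (c :: r) = pvW r by rw [pvW]; simp [hsp],
            show pvTok (c :: r) (k : Int) = pvTok r ((k : Int) + 1) by rw [pvTok]; simp [hsp]]
        have hcast : ((k : Int) + 1) = ((k + 1 : Nat) : Int) := by push_cast; ring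
        rw [hcast]
        refine ih r (by simp at hs ⊢; omega) run (k + 1) (ws ++ [c]) acc hk1
          (by rw [h2]; simp) (by simp; omega) ?_
        intro x hx
        rcases List.mem_append.mp hx with h | h
        · exact h4 x h
        · simp at h; simpa [h] using hsp
      · rw [show pvW (c :: r) = (c :: r.takeWhile (fun d => !PySem.Chars.isspace d)) ::
              pvW (r.drop (r.takeWhile (fun d => !PySem.Chars.isspace d)).length) by
            rw [pvW]; simp [hsp]]
        set w' := r.takeWhile (fun d => !PySem.Chars.isspace d) with hw'
        have hrun_le : run ≤ t.length := by
          by_contra h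
          rw [List.drop_eq_nil_of_le (by omega)] at h2
          exact absurd h2.symm (by simp)
        have hfind : PySem.Chars.findFrom t (c :: w') (run : Int) = (k : Int) := by
          rw [PySem.Chars.findFrom_natCast t _ run hrun_le, h2]
          rw [pvFind_ws ws (c :: r) w' c h4 (by simpa using hsp)
            (by simpa using List.takeWhile_prefix _)]
          simp
          omega
        simp only [List.foldl_cons]
        rw [show pvStep t (acc, (run : Int)) (c :: w') =
              (acc ++ [(String.ofList (c :: w'), (k : Int), (k : Int) + w'.length)],
               ((k + 1 + w'.length : Nat) : Int)) by
            simp [pvStep, hfind]; constructor <;> push_cast <;> ring]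
        have hdr : r.drop w'.length = t.drop (k + 1 + w'.length) := by
          rw [hk1, List.drop_drop]
        rw [ih (r.drop w'.length) (by simp at hs ⊢; omega) (k + 1 + w'.length) (k + 1 + w'.length)
          [] _ hdr (by simpa using hdr.symm) (by simp) (by simp)]
        rw [show pvTok (c :: r) (k : Int) =
            (String.ofList (c :: w'), (k : Int), (k : Int) + w'.length) ::
              pvTok (r.drop w'.length) ((k : Int) + 1 + w'.length) by
          rw [pvTok]; simp [hsp, hw']]
        have hcast : ((k + 1 + w'.length : Nat) : Int) = (k : Int) + 1 + w'.length := by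
          push_cast; ring
        rw [hcast]
        simp

lemma pvMain (text : String) : get_word_offsets text = get_word_offsets_alt text := by
  have halt : get_word_offsets_alt text = pvTok text.toList 0 := by
    simp [get_word_offsets_alt, pvAltGo_spec]
  rw [halt]
  unfold get_word_offsets
  have hmap : PySem.Str.split₀ text = (PySem.Str.split₀ text) := rfl
  have hfold :
      (PySem.Str.split₀ text).foldl (fun (st : List (String × Int × Int) × Int) word =>
        (st.1 ++ [(word, PySem.Str.findFrom text word st.2,
            PySem.Str.findFrom text word st.2 + PySem.Str.len word - 1)],
          PySem.Str.findFrom text word st.2 + PySem.Str.len word)) ([], 0)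
      = (pvW text.toList).foldl (pvStep text.toList) ([], 0) := by
    rw [← pvSplit_eq_pvW, ← PySem.Str.split₀_map_toList, List.foldl_map]
    apply PySem.List.foldl_congr_mem
    intro st word _
    simp [pvStep, PySem.Str.findFrom_eq, PySem.Str.len_eq, String.ofList_toList]
  simp only [hfold]
  have := pvFoldA text.toList text.toList.length text.toList (le_refl _) 0 0 [] []
    (by simp) (by simp) (by simp) (by simp)
  simpa using this

-- ===== VERDICT (by name: the statement is the Claim_ definition above) =====
theorem get_word_offsets_spec : Claim_equal_get_word_offsets := by
  intro text _
  unfold Spec_get_word_offsets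
  exact pvMain text
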